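-- pv_equiv track=rewrite | github.com/Sarahalqattan/Motif_finding | BA2GV2.py | score_motifs
-- ===== SOURCE A (Python) =====
-- def score_motifs(motifs):
--     t = len(motifs)
--     k = len(motifs[0])
--     score = 0
--     for j in range(k):
--         column = [motifs[i][j] for i in range(t)]
--         most_common = max(set(column), key=column.count)
--         score += sum(1 for nucleotide in column if nucleotide != most_common)
--     return score
-- ===== SOURCE B (Python) =====
-- def score_motifs(motifs):
--     # Sort each column and scan its longest run of equal characters:
--     # in a sorted column the consensus count is the longest run, so the
--     # column contributes len(column) - longest_run mismatches.
--     score = 0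
--     for column in zip(*motifs):
--         col = sorted(column)
--         prev, run, best = col[0], 1, 1
--         for ch in col[1:]:
--             run = run + 1 if ch == prev else 1
--             if run > best:
--                 best = run
--             prev = ch
--         score += len(col) - best
--     return score
-- ===== Notes on version B (the rewrite author's own statement) =====
-- stated objective: alternative
-- what changed: B transposes the motifs with zip, SORTS each column and finds the consensus count as the longest run of equal characters in one linear scan, instead of A's per-column max(set(column), key=column.count) which rescans the column once per distinct symbol.
import Mathlib
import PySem

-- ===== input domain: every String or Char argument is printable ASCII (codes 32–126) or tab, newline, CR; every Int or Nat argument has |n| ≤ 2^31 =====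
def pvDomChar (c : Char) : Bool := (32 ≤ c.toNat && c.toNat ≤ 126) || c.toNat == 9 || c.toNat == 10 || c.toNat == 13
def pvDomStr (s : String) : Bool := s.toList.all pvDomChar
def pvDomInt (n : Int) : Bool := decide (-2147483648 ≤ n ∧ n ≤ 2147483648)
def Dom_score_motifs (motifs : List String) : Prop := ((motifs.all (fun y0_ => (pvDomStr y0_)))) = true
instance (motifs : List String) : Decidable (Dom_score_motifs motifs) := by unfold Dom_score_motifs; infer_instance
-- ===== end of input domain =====

-- B transposes the motifs with zip, SORTS each column and takes the consensus count as the
-- longest run of equal characters (one linear scan), instead of A's max(set(column), key=column.count).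

-- ===== PORT A =====
def score_motifs (motifs : List String) : Int :=
  let t : Nat := motifs.length
  let k : Int := PySem.Str.len ((PySem.List.pyGet? motifs 0).getD "")   -- motifs[0]: IndexError on [] (excluded by Pre_)
  (PySem.List.pyRange 0 k).foldl (fun score j =>
    -- column = [motifs[i][j] for i in range(t)]; motifs[i][j] raises if some motif is shorter than motifs[0] (excluded by Pre_)
    let column : List Char := (PySem.List.pyRange 0 (t : Int)).map (fun i =>
      (PySem.Str.pyGet? ((PySem.List.pyGet? motifs i).getD "") j).getD ' ')
    let mostCommon : Char :=
      (PySem.List.max? (PySem.Set.ofList column) (fun c => (column.count c : Int))).getD ' '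
    score + ((column.filter (fun c => c != mostCommon)).length : Int)) 0

-- ===== PORT B =====
-- zip(*rows) for rows of characters: columns up to the shortest row's length
def pyZipCols (rows : List (List Char)) : List (List Char) :=
  match rows with
  | [] => []
  | r0 :: rest =>
    let n := rest.foldl (fun m r => min m r.length) r0.length
    (List.range n).map (fun j => (r0 :: rest).map (fun r => r.getD j ' '))  -- j < every row's length: getD default never used

-- the 'for ch in col[1:]' loop of Source B: state (prev, run, best)
def runScan (prev : Char) (run best : Nat) : List Char → Nat
  | [] => best
  | ch :: rest =>
    let run' := if ch == prev then run + 1 else 1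
    runScan ch run' (max best run') rest

def score_motifs_alt (motifs : List String) : Int :=
  (pyZipCols (motifs.map (fun s => s.toList))).foldl (fun score column =>
    let col := PySem.List.sorted column (fun c => c) false
    -- prev, run, best = col[0], 1, 1 (col nonempty whenever zip yields a column)
    let best := runScan ((PySem.List.pyGet? col 0).getD ' ') 1 1 col.tail
    score + ((col.length : Int) - (best : Int))) 0

-- ===== PRECONDITION & SPEC =====
-- Pre_ excludes exactly the inputs where A raises IndexError: the empty list (motifs[0])
-- and lists where some motif is shorter than motifs[0] (motifs[i][j] out of range).
def Pre_score_motifs (motifs : List String) : Prop :=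
  motifs ≠ [] ∧ ∀ s ∈ motifs, (motifs.headD "").toList.length ≤ s.toList.length
instance (motifs : List String) : Decidable (Pre_score_motifs motifs) := by unfold Pre_score_motifs; infer_instance

def pvWitness_score_motifs : List String := ["ACG", "GAG", "GCG"]

def Spec_score_motifs (motifs : List String) (out : Int) : Prop := out = score_motifs_alt motifs
instance (motifs : List String) (out : Int) : Decidable (Spec_score_motifs motifs out) := by unfold Spec_score_motifs; infer_instance

-- ===== CLAIM (what is proved, stated in full; the proofs are below) =====
def Claim_equal_score_motifs : Prop := ∀ (motifs : List String), Dom_score_motifs motifs → Pre_score_motifs motifs → Spec_score_motifs motifs (score_motifs motifs)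

-- ===== LEMMAS AND PROOFS =====

-- maximum multiplicity of a list, by peeling one distinct element at a time
def maxCount : List Char → Nat
  | [] => 0
  | c :: l => max (l.count c + 1) (maxCount (l.filter (fun x => x ≠ c)))
termination_by l => l.length
decreasing_by simpa using le_trans (List.length_filter_le _ _) (le_of_eq List.length_attach)

-- every count is bounded by maxCount (induction on a length bound)
lemma count_le_maxCount_aux (n : Nat) : ∀ (l : List Char), l.length ≤ n → ∀ x ∈ l, l.count x ≤ maxCount l := by
  induction n with
  | zero =>
    intro l hl x hx
    rw [List.length_eq_zero_iff.1 (Nat.le_zero.1 hl)] at hx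
    cases hx
  | succ n ih =>
    intro l hl x hx
    cases l with
    | nil => cases hx
    | cons c l =>
      simp only [maxCount]
      by_cases hxc : x = c
      · subst hxc
        simp [List.count_cons_self]
      · have hcnt : (c :: l).count x = (l.filter (fun y => y ≠ c)).count x := by
          simp [List.count_filter, hxc, Ne.symm hxc]
        rw [hcnt]
        rw [List.mem_cons] at hx
        have hmem : x ∈ l.filter (fun y => y ≠ c) := by
          rcases hx with rfl | hx
          · exact absurd rfl hxc
          · exact List.mem_filter.2 ⟨hx, by simpa using hxc⟩
        have hlen : (l.filter (fun y => y ≠ c)).length ≤ n := by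
          have h1 : (l.filter (fun y => y ≠ c)).length ≤ l.length := List.length_filter_le _ _
          simp only [List.length_cons] at hl
          omega
        exact le_trans (ih _ hlen x hmem) (le_max_right _ _)

lemma count_le_maxCount (l : List Char) (x : Char) (hx : x ∈ l) : l.count x ≤ maxCount l :=
  count_le_maxCount_aux l.length l (le_refl _) x hx

-- maxCount is attained at a member
lemma maxCount_attained_aux (n : Nat) : ∀ (l : List Char), l.length ≤ n → l ≠ [] →
    ∃ x ∈ l, maxCount l = l.count x := by
  induction n with
  | zero =>
    intro l hl h
    exact absurd (List.length_eq_zero_iff.1 (Nat.le_zero.1 hl)) h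
  | succ n ih =>
    intro l hl h
    cases l with
    | nil => exact absurd rfl h
    | cons c l =>
      simp only [maxCount]
      by_cases hf : l.filter (fun x => x ≠ c) = []
      · refine ⟨c, List.mem_cons_self, ?_⟩
        rw [hf]
        simp only [maxCount, List.count_cons_self]
        omega
      · have hlen : (l.filter (fun y => y ≠ c)).length ≤ n := by
          have h1 : (l.filter (fun y => y ≠ c)).length ≤ l.length := List.length_filter_le _ _
          simp only [List.length_cons] at hl
          omega
        obtain ⟨x, hxmem, hxeq⟩ := ih _ hlen hf
        have hxl : x ∈ l := (List.mem_filter.1 hxmem).1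
        have hxc : x ≠ c := by simpa using (List.mem_filter.1 hxmem).2
        rcases Nat.le_total (maxCount (l.filter (fun y => y ≠ c))) (l.count c + 1) with hle | hle
        · exact ⟨c, List.mem_cons_self, by rw [List.count_cons_self]; omega⟩
        · refine ⟨x, List.mem_cons_of_mem _ hxl, ?_⟩
          have hcx : (c :: l).count x = (l.filter (fun y => y ≠ c)).count x := by
            simp [List.count_filter, hxc, Ne.symm hxc]
          rw [hcx, ← hxeq]
          omega

lemma maxCount_attained (l : List Char) (h : l ≠ []) : ∃ x ∈ l, maxCount l = l.count x :=
  maxCount_attained_aux l.length l (le_refl _) h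

-- maxCount only depends on the count function, hence is permutation-invariant
lemma maxCount_eq_of_perm (l l' : List Char) (h : l.Perm l') : maxCount l = maxCount l' := by
  rcases eq_or_ne l [] with rfl | hne
  · have : l' = [] := h.symm.eq_nil
    rw [this]
  · have hne' : l' ≠ [] := by
      intro h0
      rw [h0] at h
      exact hne h.eq_nil
    obtain ⟨x, hx, hxe⟩ := maxCount_attained l hne
    obtain ⟨y, hy, hye⟩ := maxCount_attained l' hne'
    have h1 : maxCount l ≤ maxCount l' := by
      rw [hxe, h.count_eq]
      exact count_le_maxCount _ _ (h.mem_iff.1 hx)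
    have h2 : maxCount l' ≤ maxCount l := by
      rw [hye, ← h.count_eq]
      exact count_le_maxCount _ _ (h.mem_iff.2 hy)
    omega

-- invariant of the run scan over a sorted tail
lemma runScan_eq (rest : List Char) (prev : Char) (run best : Nat)
    (hs : (prev :: rest).Pairwise (· ≤ ·)) (hrb : run ≤ best) (hb : 1 ≤ run) :
    runScan prev run best rest
      = max best (max (run + rest.count prev) (maxCount (rest.filter (fun x => x ≠ prev)))) := by
  induction rest generalizing prev run best with
  | nil =>
    simp only [runScan, List.count_nil, List.filter_nil, maxCount]
    omega
  | cons ch rs ih =>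
    have hs' : (ch :: rs).Pairwise (· ≤ ·) := hs.tail
    rcases List.pairwise_cons.1 hs with ⟨hprev, -⟩
    by_cases hc : ch = prev
    · subst hc
      have : runScan ch (run + 1) (max best (run + 1)) rs
          = max (max best (run + 1)) (max ((run + 1) + rs.count ch) (maxCount (rs.filter (fun x => x ≠ ch)))) :=
        ih ch (run + 1) (max best (run + 1)) hs' (le_max_right _ _) (by omega)
      simp only [runScan, beq_self_eq_true, if_true]
      rw [this, List.count_cons_self]
      have hfil : (ch :: rs).filter (fun x => x ≠ ch) = rs.filter (fun x => x ≠ ch) := by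
        simp
      rw [hfil]
      omega
    · -- prev < ch and every element of ch :: rs is ≥ ch > prev, so prev never recurs
      have hlt : prev < ch := lt_of_le_of_ne (hprev ch List.mem_cons_self) (Ne.symm hc)
      have hgt : ∀ x ∈ ch :: rs, prev < x := by
        intro x hx
        rw [List.mem_cons] at hx
        rcases hx with rfl | hx
        · exact hlt
        · exact lt_of_lt_of_le hlt ((List.pairwise_cons.1 hs').1 x hx)
      have hcount : (ch :: rs).count prev = 0 := by
        rw [List.count_eq_zero]
        intro hmem
        exact absurd rfl (ne_of_gt (hgt prev hmem))
      have hfil : (ch :: rs).filter (fun x => x ≠ prev) = ch :: rs := by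
        apply List.filter_eq_self.2
        intro x hx
        simpa using ne_of_gt (hgt x hx)
      have hstep : runScan ch 1 (max best 1) rs
          = max (max best 1) (max (1 + rs.count ch) (maxCount (rs.filter (fun x => x ≠ ch)))) :=
        ih ch 1 (max best 1) hs' (le_max_right _ _) (le_refl 1)
      simp only [runScan, beq_iff_eq, hc, if_false]
      rw [hstep, hcount, hfil]
      simp only [maxCount]
      omega

-- for a nonempty sorted column, the longest equal run is the maximum multiplicity
lemma runScan_sorted (c : Char) (rest : List Char) (hs : (c :: rest).Pairwise (· ≤ ·)) :
    runScan c 1 1 rest = maxCount (c :: rest) := by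
  rw [runScan_eq rest c 1 1 hs (le_refl 1) (le_refl 1)]
  simp only [maxCount]
  omega

-- running min of row lengths stays at the start value when every row is at least that long
lemma foldl_min_len_eq (l : List (List Char)) (a : Nat) (h : ∀ x ∈ l, a ≤ x.length) :
    l.foldl (fun m r => min m r.length) a = a := by
  induction l generalizing a with
  | nil => rfl
  | cons x xs ih =>
    simp only [List.mem_cons, forall_eq_or_imp] at h
    simp only [List.foldl_cons, min_eq_left h.1]
    exact ih _ h.2

-- A's per-column mismatch count equals B's length - longest sorted run
lemma column_term_eq (col : List Char) (h : col ≠ []) :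
    ((col.filter (fun c => c != (PySem.List.max? (PySem.Set.ofList col) (fun c => (col.count c : Int))).getD ' ')).length : Int)
      = ((PySem.List.sorted col (fun c => c) false).length : Int)
        - ((runScan ((PySem.List.pyGet? (PySem.List.sorted col (fun c => c) false) 0).getD ' ') 1 1
            (PySem.List.sorted col (fun c => c) false).tail : Nat) : Int) := by
  -- name the sorted column
  have hperm : (PySem.List.sorted col (fun c => c) false).Perm col := PySem.List.sorted_perm _ _ _
  have hsnil : PySem.List.sorted col (fun c => c) false ≠ [] := by
    intro h0
    rw [h0] at hperm
    exact h hperm.symm.eq_nil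
  obtain ⟨c0, rest, hcol⟩ : ∃ c0 rest, PySem.List.sorted col (fun c => c) false = c0 :: rest := by
    cases hx : PySem.List.sorted col (fun c => c) false with
    | nil => exact absurd hx hsnil
    | cons a l => exact ⟨a, l, rfl⟩
  have hpw : (c0 :: rest).Pairwise (· ≤ ·) := by
    have := PySem.List.sorted_pairwise col (fun c => c) (κ := Char)
    rw [hcol] at this
    exact this
  -- B's run scan computes maxCount col
  have hbest : runScan ((PySem.List.pyGet? (PySem.List.sorted col (fun c => c) false) 0).getD ' ') 1 1
      (PySem.List.sorted col (fun c => c) false).tail = maxCount col := by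
    rw [hcol]
    have hget : PySem.List.pyGet? (c0 :: rest) (0 : Int) = some c0 := by simp
    rw [hget]
    simp only [Option.getD_some, List.tail_cons]
    rw [runScan_sorted c0 rest hpw]
    exact maxCount_eq_of_perm _ _ (hcol ▸ hperm)
  -- A's most_common attains the maximum multiplicity
  obtain ⟨cm, hcm⟩ : ∃ cm, cm ∈ col := List.exists_mem_of_ne_nil col h
  have hset : PySem.Set.ofList col ≠ [] := by
    intro hnil
    have := (PySem.Set.mem_ofList col cm).2 hcm
    simp [hnil] at this
  obtain ⟨mc, hmc⟩ : ∃ mc, PySem.List.max? (PySem.Set.ofList col) (fun c => (col.count c : Int)) = some mc := by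
    cases hx : PySem.List.max? (PySem.Set.ofList col) (fun c => (col.count c : Int)) with
    | none => exact absurd ((PySem.List.max?_eq_none_iff _ _).1 hx) hset
    | some m => exact ⟨m, rfl⟩
  have hmcmem : mc ∈ col := (PySem.Set.mem_ofList col mc).1 (PySem.List.max?_mem hmc)
  have hmceq : col.count mc = maxCount col := by
    have hle : col.count mc ≤ maxCount col := count_le_maxCount col mc hmcmem
    obtain ⟨x, hx, hxe⟩ := maxCount_attained col h
    have hxset : x ∈ PySem.Set.ofList col := (PySem.Set.mem_ofList col x).2 hx
    have := PySem.List.max?_isMax hmc x hxset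
    omega
  rw [hmc, hbest]
  simp only [Option.getD_some]
  -- |filter (≠ mc)| = |col| - count mc, and |sorted col| = |col|
  have hlen : (PySem.List.sorted col (fun c => c) false).length = col.length := hperm.length_eq
  have h1 : col.length = List.countP (fun x => x == mc) col
      + List.countP (fun a => decide ¬(a == mc) = true) col :=
    List.length_eq_countP_add_countP (l := col) (p := (· == mc))
  have h2 : (col.filter (fun c => c != mc)).length
      = List.countP (fun a => decide ¬(a == mc) = true) col := by
    rw [← List.countP_eq_length_filter]
    apply List.countP_congr
    intro x _
    simp [bne]
  have h3 : col.count mc = List.countP (· == mc) col := by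
    simp [List.count]
  omega

-- the column A builds by indexing equals B's zip column
lemma column_eq (m0 : String) (rest : List String)
    (hall : ∀ s ∈ m0 :: rest, m0.toList.length ≤ s.toList.length)
    (j : Nat) (hj : j < m0.toList.length) :
    List.map (fun i =>
        (PySem.Str.pyGet? ((PySem.List.pyGet? (m0 :: rest) i).getD "") (j : Int)).getD ' ')
      (List.map (fun k => ((k : Nat) : Int)) (List.range (m0 :: rest).length))
      = m0.toList.getD j ' ' :: List.map (fun r => r.getD j ' ') (List.map (fun s => s.toList) rest) := by
  have hrhs : m0.toList.getD j ' ' :: List.map (fun r => r.getD j ' ') (List.map (fun s => s.toList) rest)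
      = List.map (fun s => s.toList.getD j ' ') (m0 :: rest) := by
    simp [List.map_map, Function.comp]
  rw [hrhs, List.map_map]
  apply List.ext_getElem
  · simp
  · intro i hi₁ hi₂
    have hi : i < (m0 :: rest).length := by simpa using hi₂
    simp only [List.getElem_map, List.getElem_range, Function.comp_apply]
    have hget : PySem.List.pyGet? (m0 :: rest) ((i : Nat) : Int) = some ((m0 :: rest)[i]'hi) := by
      rw [PySem.List.pyGet?_natCast]
      exact List.getElem?_eq_getElem hi
    rw [hget, Option.getD_some]
    have hlen : j < (((m0 :: rest)[i]'hi)).toList.length :=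
      lt_of_lt_of_le hj (hall _ (List.getElem_mem hi))
    have hstr : PySem.Str.pyGet? ((m0 :: rest)[i]'hi) (j : Int)
        = some ((((m0 :: rest)[i]'hi)).toList[j]'hlen) := by
      show PySem.Chars.pyGet? _ _ = _
      show PySem.List.pyGet? _ _ = _
      rw [PySem.List.pyGet?_natCast]
      exact List.getElem?_eq_getElem hlen
    rw [hstr]
    simp [List.getElem?_eq_getElem hlen]

-- ===== VERDICT (by name: the statement is the Claim_ definition above) =====
theorem score_motifs_spec : Claim_equal_score_motifs := by
  intro motifs _hdom hpre
  obtain ⟨hne, hall⟩ := hpre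
  obtain ⟨m0, rest, rfl⟩ : ∃ m0 rest, motifs = m0 :: rest := by
    cases motifs with
    | nil => exact absurd rfl hne
    | cons a l => exact ⟨a, l, rfl⟩
  simp only [List.headD_cons] at hall
  unfold Spec_score_motifs score_motifs score_motifs_alt pyZipCols
  -- A side: motifs[0] = m0, k = |m0|
  have h0 : PySem.List.pyGet? (m0 :: rest) 0 = some m0 := by
    simp
  rw [h0]
  simp only [Option.getD_some, PySem.Str.len_eq, PySem.List.pyRange_zero_natCast, List.map_cons]
  -- B side: the zip width is |m0|
  have hmin : (rest.map (fun s => s.toList)).foldl (fun m r => min m r.length) m0.toList.length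
      = m0.toList.length := by
    apply foldl_min_len_eq
    intro x hx
    obtain ⟨s, hs, rfl⟩ := List.mem_map.1 hx
    exact hall s (List.mem_cons_of_mem _ hs)
  rw [hmin]
  -- both folds are sums over List.range |m0|
  rw [List.foldl_map, List.foldl_map]
  rw [PySem.List.foldl_add, PySem.List.foldl_add]
  simp only [zero_add]
  congr 1
  apply List.map_congr_left
  intro j hj
  have hj' : j < m0.toList.length := List.mem_range.1 hj
  rw [column_eq m0 rest hall j hj']
  exact column_term_eq _ (by simp)
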